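-- pv_equiv track=rewrite | github.com/ShaielVistuch/Final-Project- | main.py | find_monotonic_functions
-- ===== SOURCE A (Python) =====
-- def find_monotonic_functions(possible_functions,activators_col_repressors_col):
--     # Initialize monotonic function list
--     monotonic_functions =[]
--
--     # checking which functions are monotonic:
--     for func in possible_functions:
--         monotonic = True
--
--         # iterating over the each "box"
--         for i in range(len(activators_col_repressors_col)):
--
--             if func[i]==1: # if regulated component is active at state i
--
--                 # we need to check that if one of the activators switches from inactive to active, the regulated
--                 # component still remains active
--                 for k in range(len(activators_col_repressors_col)):
--
--                     # getting state of the activators and repressors at column i and column k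
--                     state1 = activators_col_repressors_col[i]
--                     state2 = activators_col_repressors_col[k]
--
--                     # if an activator switches from inactive to active
--                     if (state2[0][0]+state2[1][0])>(state1[0][0]+state1[1][0]):
--
--                         # repressors must remain unchanged so it won't affect the component
--                         if (state2[0][1]+state2[1][1])==(state1[0][1]+state1[1][1]):
--
--                             # check if the regulated component remain active
--                             if func[k] != 1:
--                                 monotonic = False # if it is inactive, we can infer the function is not monotonic
--                                 break
--
--
--             else: # if regulated component is inactive at state i
--
--                 # we need to check that if one of the repressors switches from inactive to active, the regulated
--                 # component remains inactive.
--                 for k in range(len(activators_col_repressors_col)):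
--
--                     # getting state of the activators and repressors at column i and column k
--                     state1 = activators_col_repressors_col[i]
--                     state2 = activators_col_repressors_col[k]
--
--                     # if an activator switches from inactive to active
--                     if (state2[0][1]+state2[1][1])>(state1[0][1]+state1[1][1]):
--
--                         # activators must remain unchanged so it won't affect the component
--                         if (state2[0][0]+state2[1][0])==(state1[0][0]+state1[1][0]):
--
--                             # check if the regulated component remain inactive
--                             if func[k] != 0:
--                                 monotonic = False # if it is active, we can infer the function is not monotonic
--                                 break
--
--         if monotonic == True:
--             monotonic_functions.append(func)
--
--     return monotonic_functions
-- ===== SOURCE B (Python) =====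
-- def find_monotonic_functions(possible_functions, activators_col_repressors_col):
--     # Nothing to filter.
--     if not possible_functions:
--         return []
--
--     # Precompute (activator_sum, repressor_sum) once per state column.
--     sums = []
--     for st in activators_col_repressors_col:
--         sums.append((st[0][0] + st[1][0], st[0][1] + st[1][1]))
--
--     monotonic_functions = []
--     for func in possible_functions:
--         # min activator sum among states where the component is active,
--         # grouped by repressor sum
--         min_act = {}
--         # min repressor sum among states where the component is inactive,
--         # grouped by activator sum
--         min_rep = {}
--         for (a, r), v in zip(sums, func):
--             if v == 1:
--                 if r not in min_act or a < min_act[r]: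
--                     min_act[r] = a
--             else:
--                 if a not in min_rep or r < min_rep[a]:
--                     min_rep[a] = r
--
--         ok = True
--         for (a, r), v in zip(sums, func):
--             if v != 1 and r in min_act and a > min_act[r]:
--                 ok = False
--                 break
--             if v != 0 and a in min_rep and r > min_rep[a]:
--                 ok = False
--                 break
--         if ok:
--             monotonic_functions.append(func)
--     return monotonic_functions
-- ===== Notes on version B (the rewrite author's own statement) =====
-- stated objective: faster
-- what changed: A rescans all state columns for every (function, column) pair; B precomputes each column's activator/repressor sums once and, per function, builds two dictionaries of group minima (min activator sum per repressor sum among active states, min repressor sum per activator sum among inactive states) so each function is checked in one linear pass instead of a quadratic pair scan.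
-- outside the precondition, e.g. on find_monotonic_functions([[1]], [[[1], [1]]]): A returns [[1]], B raises IndexError
import Mathlib
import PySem

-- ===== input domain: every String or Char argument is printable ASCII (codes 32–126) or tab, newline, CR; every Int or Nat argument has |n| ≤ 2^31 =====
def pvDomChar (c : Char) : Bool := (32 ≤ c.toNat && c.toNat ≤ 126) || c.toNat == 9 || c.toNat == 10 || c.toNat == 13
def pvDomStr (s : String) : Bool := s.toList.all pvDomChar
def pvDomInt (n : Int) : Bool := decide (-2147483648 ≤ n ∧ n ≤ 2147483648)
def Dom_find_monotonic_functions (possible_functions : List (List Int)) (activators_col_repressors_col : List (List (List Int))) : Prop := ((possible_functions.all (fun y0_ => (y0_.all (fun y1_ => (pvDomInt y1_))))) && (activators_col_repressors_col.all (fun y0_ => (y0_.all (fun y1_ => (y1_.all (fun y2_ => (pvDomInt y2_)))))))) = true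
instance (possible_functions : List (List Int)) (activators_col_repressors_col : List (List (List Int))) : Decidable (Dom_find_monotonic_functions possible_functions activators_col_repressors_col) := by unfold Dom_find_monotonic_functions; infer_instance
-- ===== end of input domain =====

-- B replaces A's scan over all state pairs per function by precomputed per-state sums and
-- per-function dictionaries of group minima; objective: faster (fewer passes per function).

-- ===== PORT A =====
-- state[0][0]+state[1][0] (activator sum) and state[0][1]+state[1][1] (repressor sum);
-- list indexing is written with getD: Pre_ guarantees every index A evaluates is in range.
def aSum (st : List (List Int)) : Int := (st.getD 0 []).getD 0 0 + (st.getD 1 []).getD 0 0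
def rSum (st : List (List Int)) : Int := (st.getD 0 []).getD 1 0 + (st.getD 1 []).getD 1 0

-- the k-loop of the `func[i]==1` branch (break = stop, returning False)
def innerAct (acr : List (List (List Int))) (func : List Int) (st1 : List (List Int))
    (mono : Bool) : List Nat → Bool
  | [] => mono
  | k :: ks =>
    let st2 := acr.getD k []
    if aSum st2 > aSum st1 then
      if rSum st2 = rSum st1 then
        if func.getD k 0 ≠ 1 then false
        else innerAct acr func st1 mono ks
      else innerAct acr func st1 mono ks
    else innerAct acr func st1 mono ks

-- the k-loop of the else branch
def innerRep (acr : List (List (List Int))) (func : List Int) (st1 : List (List Int))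
    (mono : Bool) : List Nat → Bool
  | [] => mono
  | k :: ks =>
    let st2 := acr.getD k []
    if rSum st2 > rSum st1 then
      if aSum st2 = aSum st1 then
        if func.getD k 0 ≠ 0 then false
        else innerRep acr func st1 mono ks
      else innerRep acr func st1 mono ks
    else innerRep acr func st1 mono ks

-- the i-loop computing the `monotonic` flag for one func
def monoA (acr : List (List (List Int))) (func : List Int) : Bool :=
  (List.range acr.length).foldl
    (fun mono i =>
      let st1 := acr.getD i []
      if func.getD i 0 = 1 then innerAct acr func st1 mono (List.range acr.length)
      else innerRep acr func st1 mono (List.range acr.length))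
    true

def find_monotonic_functions (possible_functions : List (List Int)) (activators_col_repressors_col : List (List (List Int))) : List (List Int) :=
  possible_functions.foldl
    (fun monotonic_functions func =>
      if monoA activators_col_repressors_col func then monotonic_functions ++ [func]
      else monotonic_functions)
    []

-- ===== PORT B =====
-- precomputed (activator_sum, repressor_sum) per state column
def sumsB (acr : List (List (List Int))) : List (Int × Int) :=
  acr.map (fun st => (aSum st, rSum st))

-- `key in d and d[key] < x`  (Python: `r in min_act and a > min_act[r]`)
def hasLt (d : PySem.Dict Int Int) (key x : Int) : Bool :=
  match d.get? key with
  | some m => decide (x > m)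
  | none => false

-- body of the first per-func loop: keep the minimal a per r when v == 1 (min_act),
-- the minimal r per a when v != 1 (min_rep)
def minStep (d : PySem.Dict Int Int × PySem.Dict Int Int) (p : (Int × Int) × Int) :
    PySem.Dict Int Int × PySem.Dict Int Int :=
  if p.2 = 1 then
    ((match d.1.get? p.1.2 with
      | none => d.1.insert p.1.2 p.1.1
      | some m => if p.1.1 < m then d.1.insert p.1.2 p.1.1 else d.1),
     d.2)
  else
    (d.1,
     (match d.2.get? p.1.1 with
      | none => d.2.insert p.1.1 p.1.2
      | some m => if p.1.2 < m then d.2.insert p.1.1 p.1.2 else d.2))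

def buildMins (pairs : List ((Int × Int) × Int)) :
    PySem.Dict Int Int × PySem.Dict Int Int :=
  pairs.foldl minStep (PySem.Dict.empty, PySem.Dict.empty)

-- the second per-func loop (break = stop, returning false)
def checkOk (ma mr : PySem.Dict Int Int) : List ((Int × Int) × Int) → Bool
  | [] => true
  | p :: rest =>
    if p.2 != 1 && hasLt ma p.1.2 p.1.1 then false
    else if p.2 != 0 && hasLt mr p.1.1 p.1.2 then false
    else checkOk ma mr rest

def find_monotonic_functions_alt (possible_functions : List (List Int)) (activators_col_repressors_col : List (List (List Int))) : List (List Int) :=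
  if possible_functions.isEmpty then []
  else
    let sums := sumsB activators_col_repressors_col
    possible_functions.foldl
      (fun monotonic_functions func =>
        let pairs := sums.zip func
        let mins := buildMins pairs
        if checkOk mins.1 mins.2 pairs then monotonic_functions ++ [func]
        else monotonic_functions)
      []

-- ===== PRECONDITION & SPEC =====
-- Pre_ excludes the inputs where Python A raises IndexError: a func shorter than the number of
-- state columns, or (with possible_functions nonempty) a state without two rows of two entries.
-- A can still return on a few malformed-state inputs whose missing entries sit behind its
-- short-circuited comparisons and are never read; B reads every state up front and raises
-- there, so those inputs are excluded as well (see the cite in the claim).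
def Pre_find_monotonic_functions (possible_functions : List (List Int)) (activators_col_repressors_col : List (List (List Int))) : Prop :=
  possible_functions = [] ∨
  ((∀ st ∈ activators_col_repressors_col, 2 ≤ st.length ∧ ∀ row ∈ st.take 2, 2 ≤ row.length) ∧
   ∀ f ∈ possible_functions, activators_col_repressors_col.length ≤ f.length)

instance (possible_functions : List (List Int)) (activators_col_repressors_col : List (List (List Int))) : Decidable (Pre_find_monotonic_functions possible_functions activators_col_repressors_col) := by
  unfold Pre_find_monotonic_functions; infer_instance

def pvWitness_find_monotonic_functions : List (List Int) × List (List (List Int)) :=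
  ([[1, 0], [0, 1]], [[[0, 0], [0, 0]], [[1, 0], [0, 1]]])

def Spec_find_monotonic_functions (possible_functions : List (List Int)) (activators_col_repressors_col : List (List (List Int))) (out : List (List Int)) : Prop := out = find_monotonic_functions_alt possible_functions activators_col_repressors_col
instance (possible_functions : List (List Int)) (activators_col_repressors_col : List (List (List Int))) (out : List (List Int)) : Decidable (Spec_find_monotonic_functions possible_functions activators_col_repressors_col out) := by unfold Spec_find_monotonic_functions; infer_instance

-- ===== CLAIM (what is proved, stated in full; the proofs are below) =====
def Claim_equal_find_monotonic_functions : Prop := ∀ (possible_functions : List (List Int)) (activators_col_repressors_col : List (List (List Int))), Dom_find_monotonic_functions possible_functions activators_col_repressors_col → Pre_find_monotonic_functions possible_functions activators_col_repressors_col → Spec_find_monotonic_functions possible_functions activators_col_repressors_col (find_monotonic_functions possible_functions activators_col_repressors_col)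

-- ===== LEMMAS AND PROOFS =====

-- A's violation condition between state columns i and k, as A's branches test it
def violP (acr : List (List (List Int))) (func : List Int) (i k : Nat) : Prop :=
  if func.getD i 0 = 1 then
    aSum (acr.getD k []) > aSum (acr.getD i []) ∧ rSum (acr.getD k []) = rSum (acr.getD i []) ∧ func.getD k 0 ≠ 1
  else
    rSum (acr.getD k []) > rSum (acr.getD i []) ∧ aSum (acr.getD k []) = aSum (acr.getD i []) ∧ func.getD k 0 ≠ 0

theorem innerAct_iff (acr : List (List (List Int))) (func : List Int) (st1 : List (List Int)) :
    ∀ (ks : List Nat) (mono : Bool),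
      (innerAct acr func st1 mono ks = true ↔
        (mono = true ∧ ∀ k ∈ ks,
          ¬(aSum (acr.getD k []) > aSum st1 ∧ rSum (acr.getD k []) = rSum st1 ∧ func.getD k 0 ≠ 1))) := by
  intro ks
  induction ks with
  | nil => intro mono; simp [innerAct]
  | cons k ks ih =>
    intro mono
    simp only [innerAct]
    split_ifs with h1 h2 h3 <;> simp [ih] <;> tauto

theorem innerRep_iff (acr : List (List (List Int))) (func : List Int) (st1 : List (List Int)) :
    ∀ (ks : List Nat) (mono : Bool),
      (innerRep acr func st1 mono ks = true ↔
        (mono = true ∧ ∀ k ∈ ks,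
          ¬(rSum (acr.getD k []) > rSum st1 ∧ aSum (acr.getD k []) = aSum st1 ∧ func.getD k 0 ≠ 0))) := by
  intro ks
  induction ks with
  | nil => intro mono; simp [innerRep]
  | cons k ks ih =>
    intro mono
    simp only [innerRep]
    split_ifs with h1 h2 h3 <;> simp [ih] <;> tauto

theorem foldl_bool_iff (f : Bool → Nat → Bool) (P : Nat → Prop)
    (h : ∀ m i, (f m i = true ↔ (m = true ∧ P i))) :
    ∀ (l : List Nat) (b : Bool), (l.foldl f b = true ↔ (b = true ∧ ∀ i ∈ l, P i)) := by
  intro l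
  induction l with
  | nil => intro b; simp
  | cons x xs ih =>
    intro b
    simp only [List.foldl, ih, h, List.mem_cons]
    constructor
    · rintro ⟨⟨hb, hx⟩, hxs⟩
      exact ⟨hb, fun i hi => hi.elim (fun he => he ▸ hx) (hxs i)⟩
    · rintro ⟨hb, hall⟩
      exact ⟨⟨hb, hall x (Or.inl rfl)⟩, fun i hi => hall i (Or.inr hi)⟩

theorem monoA_iff (acr : List (List (List Int))) (func : List Int) :
    (monoA acr func = true ↔
      ∀ i ∈ List.range acr.length, ∀ k ∈ List.range acr.length, ¬ violP acr func i k) := by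
  unfold monoA
  rw [foldl_bool_iff _ (fun i => ∀ k ∈ List.range acr.length, ¬ violP acr func i k)]
  · simp
  · intro m i
    by_cases hf : func.getD i 0 = 1 <;>
      simp only [hf, if_true, if_false, violP, innerAct_iff, innerRep_iff] <;> simp [hf]

theorem checkOk_iff (ma mr : PySem.Dict Int Int) :
    ∀ (l : List ((Int × Int) × Int)),
      (checkOk ma mr l = true ↔
        ∀ p ∈ l, ¬(p.2 ≠ 1 ∧ hasLt ma p.1.2 p.1.1 = true) ∧
                 ¬(p.2 ≠ 0 ∧ hasLt mr p.1.1 p.1.2 = true)) := by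
  intro l
  induction l with
  | nil => simp [checkOk]
  | cons p rest ih =>
    simp only [checkOk]
    split_ifs with h1 h2 <;>
      simp_all [Bool.and_eq_true, bne_iff_ne] <;> tauto

-- running minimum as the dictionary folds compute it
def ominP (o : Option Int) (x : Int) : Int :=
  match o with
  | none => x
  | some m => min m x

theorem foldl_minStep_fst (l : List ((Int × Int) × Int)) :
    ∀ (ma mr : PySem.Dict Int Int) (r : Int),
      ((l.foldl minStep (ma, mr)).1).get? r =
        l.foldl (fun o p => if p.2 = 1 ∧ p.1.2 = r then some (ominP o p.1.1) else o) (ma.get? r) := by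
  induction l with
  | nil => intro ma mr r; rfl
  | cons x xs ih =>
    intro ma mr r
    have hstep : (minStep (ma, mr) x).1.get? r =
        (if x.2 = 1 ∧ x.1.2 = r then some (ominP (ma.get? r) x.1.1) else ma.get? r) := by
      unfold minStep
      by_cases hv : x.2 = 1
      · simp only [hv, if_true, true_and]
        by_cases hr : x.1.2 = r
        · subst hr
          cases hma : ma.get? x.1.2 with
          | none => simp [PySem.Dict.get?_insert, hma, ominP]
          | some m =>
            by_cases hlt : x.1.1 < m
            · simp [hlt, PySem.Dict.get?_insert, hma, ominP, min_eq_right (le_of_lt hlt)]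
            · simp [hlt, hma, ominP, min_eq_left (le_of_not_gt hlt)]
        · have hne : r ≠ x.1.2 := fun he => hr he.symm
          cases hma : ma.get? x.1.2 with
          | none => simp [PySem.Dict.get?_insert, hne, hr]
          | some m =>
            by_cases hlt : x.1.1 < m <;> simp [hlt, PySem.Dict.get?_insert, hne, hr]
      · simp [hv]
    rcases hmk : minStep (ma, mr) x with ⟨ma', mr'⟩
    rw [hmk] at hstep
    simp only [List.foldl, hmk, ih ma' mr' r]
    rw [show (ma', mr').1 = ma' from rfl] at hstep
    rw [hstep]

theorem foldl_minStep_snd (l : List ((Int × Int) × Int)) :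
    ∀ (ma mr : PySem.Dict Int Int) (a : Int),
      ((l.foldl minStep (ma, mr)).2).get? a =
        l.foldl (fun o p => if ¬p.2 = 1 ∧ p.1.1 = a then some (ominP o p.1.2) else o) (mr.get? a) := by
  induction l with
  | nil => intro ma mr a; rfl
  | cons x xs ih =>
    intro ma mr a
    have hstep : (minStep (ma, mr) x).2.get? a =
        (if ¬x.2 = 1 ∧ x.1.1 = a then some (ominP (mr.get? a) x.1.2) else mr.get? a) := by
      unfold minStep
      by_cases hv : x.2 = 1
      · simp [hv]
      · simp only [hv, if_false, not_false_iff, true_and]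
        by_cases hr : x.1.1 = a
        · subst hr
          cases hmr : mr.get? x.1.1 with
          | none => simp [PySem.Dict.get?_insert, hmr, ominP]
          | some m =>
            by_cases hlt : x.1.2 < m
            · simp [hlt, PySem.Dict.get?_insert, hmr, ominP, min_eq_right (le_of_lt hlt)]
            · simp [hlt, hmr, ominP, min_eq_left (le_of_not_gt hlt)]
        · have hne : a ≠ x.1.1 := fun he => hr he.symm
          cases hmr : mr.get? x.1.1 with
          | none => simp [PySem.Dict.get?_insert, hne, hr]
          | some m =>
            by_cases hlt : x.1.2 < m <;> simp [hlt, PySem.Dict.get?_insert, hne, hr]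
    rcases hmk : minStep (ma, mr) x with ⟨ma', mr'⟩
    rw [hmk] at hstep
    simp only [List.foldl, hmk, ih ma' mr' a]
    rw [show (ma', mr').2 = mr' from rfl] at hstep
    rw [hstep]

theorem foldl_omin_lt_iff (f : ((Int × Int) × Int) → Int) (c : ((Int × Int) × Int) → Prop)
    [DecidablePred c] (a : Int) :
    ∀ (l : List ((Int × Int) × Int)) (o : Option Int),
      ((∃ m, l.foldl (fun o p => if c p then some (ominP o (f p)) else o) o = some m ∧ m < a)
        ↔ ((∃ m, o = some m ∧ m < a) ∨ ∃ p ∈ l, c p ∧ f p < a)) := by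
  intro l
  induction l with
  | nil => intro o; simp
  | cons x xs ih =>
    intro o
    simp only [List.foldl, ih, List.mem_cons]
    by_cases hc : c x
    · simp only [hc, if_true]
      have homin : (∃ m, some (ominP o (f x)) = some m ∧ m < a)
          ↔ ((∃ m, o = some m ∧ m < a) ∨ f x < a) := by
        cases o with
        | none => simp [ominP]
        | some m0 => simp [ominP, min_lt_iff]
      rw [homin]
      constructor
      · rintro ((h | h) | ⟨p, hp, hcp, hfp⟩)
        · exact Or.inl h
        · exact Or.inr ⟨x, Or.inl rfl, hc, h⟩
        · exact Or.inr ⟨p, Or.inr hp, hcp, hfp⟩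
      · rintro (h | ⟨p, (rfl | hp), hcp, hfp⟩)
        · exact Or.inl (Or.inl h)
        · exact Or.inl (Or.inr hfp)
        · exact Or.inr ⟨p, hp, hcp, hfp⟩
    · simp only [hc, if_false]
      constructor
      · rintro (h | ⟨p, hp, hcp, hfp⟩)
        · exact Or.inl h
        · exact Or.inr ⟨p, Or.inr hp, hcp, hfp⟩
      · rintro (h | ⟨p, (rfl | hp), hcp, hfp⟩)
        · exact Or.inl h
        · exact absurd hcp hc
        · exact Or.inr ⟨p, hp, hcp, hfp⟩

theorem hasLt_iff (d : PySem.Dict Int Int) (key x : Int) :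
    (hasLt d key x = true ↔ ∃ m, d.get? key = some m ∧ m < x) := by
  unfold hasLt
  cases h : d.get? key <;> simp [h]

theorem minA_lt_iff (pairs : List ((Int × Int) × Int)) (r a : Int) :
    (hasLt (buildMins pairs).1 r a = true ↔
      ∃ p ∈ pairs, p.2 = 1 ∧ p.1.2 = r ∧ p.1.1 < a) := by
  rw [hasLt_iff]
  unfold buildMins
  rw [foldl_minStep_fst]
  rw [PySem.Dict.get?_empty]
  rw [foldl_omin_lt_iff (fun p => p.1.1) (fun p => p.2 = 1 ∧ p.1.2 = r) a pairs none]
  simp [and_assoc]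

theorem minR_lt_iff (pairs : List ((Int × Int) × Int)) (a r : Int) :
    (hasLt (buildMins pairs).2 a r = true ↔
      ∃ p ∈ pairs, ¬p.2 = 1 ∧ p.1.1 = a ∧ p.1.2 < r) := by
  rw [hasLt_iff]
  unfold buildMins
  rw [foldl_minStep_snd]
  rw [PySem.Dict.get?_empty]
  rw [foldl_omin_lt_iff (fun p => p.1.2) (fun p => ¬p.2 = 1 ∧ p.1.1 = a) r pairs none]
  simp [and_assoc]

theorem mem_pairs_iff (acr : List (List (List Int))) (func : List Int)
    (h : acr.length ≤ func.length) (p : (Int × Int) × Int) :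
    (p ∈ (sumsB acr).zip func ↔
      ∃ j, ∃ _ : j < acr.length,
        p = ((aSum (acr.getD j []), rSum (acr.getD j [])), func.getD j 0)) := by
  have hlz : ((sumsB acr).zip func).length = acr.length := by
    simp [sumsB]; omega
  constructor
  · intro hp
    obtain ⟨j, hj, hpj⟩ := List.mem_iff_getElem.mp hp
    have hj' : j < acr.length := by omega
    have hjf : j < func.length := by omega
    refine ⟨j, hj', ?_⟩
    rw [← hpj]
    rw [List.getElem_zip]
    simp [sumsB, List.getD, List.getElem?_eq_getElem hj', List.getElem?_eq_getElem hjf]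
  · rintro ⟨j, hj, rfl⟩
    apply List.mem_iff_getElem.mpr
    have hjf : j < func.length := by omega
    refine ⟨j, by omega, ?_⟩
    rw [List.getElem_zip]
    simp [sumsB, List.getD, List.getElem?_eq_getElem hj, List.getElem?_eq_getElem hjf]

theorem perFunc (acr : List (List (List Int))) (func : List Int)
    (h : acr.length ≤ func.length) :
    monoA acr func =
      checkOk (buildMins ((sumsB acr).zip func)).1 (buildMins ((sumsB acr).zip func)).2
        ((sumsB acr).zip func) := by
  have H : (monoA acr func = true ↔
      checkOk (buildMins ((sumsB acr).zip func)).1 (buildMins ((sumsB acr).zip func)).2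
        ((sumsB acr).zip func) = true) := by
    rw [monoA_iff, checkOk_iff]
    constructor
    · intro hA p hp
      obtain ⟨k, hk, rfl⟩ := (mem_pairs_iff acr func h p).mp hp
      constructor
      · rintro ⟨hne1, hlt⟩
        rw [minA_lt_iff] at hlt
        obtain ⟨q, hq, hq1, hqr, hqa⟩ := hlt
        obtain ⟨i, hi, rfl⟩ := (mem_pairs_iff acr func h q).mp hq
        refine hA i (List.mem_range.mpr hi) k (List.mem_range.mpr hk) ?_
        unfold violP
        rw [if_pos hq1]
        exact ⟨hqa, hqr.symm, hne1⟩
      · rintro ⟨hne0, hlt⟩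
        rw [minR_lt_iff] at hlt
        obtain ⟨q, hq, hq1, hqa, hqr⟩ := hlt
        obtain ⟨i, hi, rfl⟩ := (mem_pairs_iff acr func h q).mp hq
        refine hA i (List.mem_range.mpr hi) k (List.mem_range.mpr hk) ?_
        unfold violP
        rw [if_neg hq1]
        exact ⟨hqr, hqa.symm, hne0⟩
    · intro hB i hik k hkk hviol
      have hi := List.mem_range.mp hik
      have hk := List.mem_range.mp hkk
      have hpk : ((aSum (acr.getD k []), rSum (acr.getD k [])), func.getD k 0)
          ∈ (sumsB acr).zip func := (mem_pairs_iff acr func h _).mpr ⟨k, hk, rfl⟩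
      have hpi : ((aSum (acr.getD i []), rSum (acr.getD i [])), func.getD i 0)
          ∈ (sumsB acr).zip func := (mem_pairs_iff acr func h _).mpr ⟨i, hi, rfl⟩
      obtain ⟨hb1, hb2⟩ := hB _ hpk
      unfold violP at hviol
      by_cases hf : func.getD i 0 = 1
      · rw [if_pos hf] at hviol
        obtain ⟨hgt, heq, hne⟩ := hviol
        exact hb1 ⟨hne, (minA_lt_iff _ _ _).mpr ⟨_, hpi, hf, heq.symm, hgt⟩⟩
      · rw [if_neg hf] at hviol
        obtain ⟨hgt, heq, hne⟩ := hviol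
        exact hb2 ⟨hne, (minR_lt_iff _ _ _).mpr ⟨_, hpi, hf, heq.symm, hgt⟩⟩
  cases hA : monoA acr func with
  | true => exact (H.mp hA).symm
  | false =>
    cases hBv : checkOk (buildMins ((sumsB acr).zip func)).1 (buildMins ((sumsB acr).zip func)).2
        ((sumsB acr).zip func) with
    | true => exact absurd (H.mpr hBv) (by simp [hA])
    | false => rfl

theorem foldl_funcs_eq (acr : List (List (List Int))) :
    ∀ (funcs : List (List Int)) (acc : List (List Int)),
      (∀ f ∈ funcs, acr.length ≤ f.length) →
      funcs.foldl (fun out func => if monoA acr func then out ++ [func] else out) acc =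
      funcs.foldl (fun out func =>
        if checkOk (buildMins ((sumsB acr).zip func)).1 (buildMins ((sumsB acr).zip func)).2
            ((sumsB acr).zip func) then out ++ [func] else out) acc := by
  intro funcs
  induction funcs with
  | nil => intro acc _; rfl
  | cons f fs ih =>
    intro acc hlen
    simp only [List.foldl]
    rw [perFunc acr f (hlen f List.mem_cons_self)]
    exact ih _ (fun g hg => hlen g (List.mem_cons_of_mem _ hg))

theorem pv_main : ∀ (funcs : List (List Int)) (acr : List (List (List Int))),
    Pre_find_monotonic_functions funcs acr →
    find_monotonic_functions funcs acr = find_monotonic_functions_alt funcs acr := by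
  intro funcs acr hpre
  rcases hpre with h0 | ⟨_, hlen⟩
  · subst h0; rfl
  · cases funcs with
    | nil => rfl
    | cons f fs =>
      show (f :: fs).foldl (fun out func => if monoA acr func then out ++ [func] else out) [] = _
      rw [find_monotonic_functions_alt]
      rw [if_neg (by simp)]
      exact foldl_funcs_eq acr (f :: fs) [] hlen

-- ===== VERDICT (by name: the statement is the Claim_ definition above) =====
theorem find_monotonic_functions_spec : Claim_equal_find_monotonic_functions := by
  intro funcs acr _ hpre
  unfold Spec_find_monotonic_functions
  exact pv_main funcs acr hpre
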